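-- pv_equiv track=rewrite | github.com/mjyt13/multimedia | prikoli.py | define_graph
-- ===== SOURCE A (Python) =====
-- def define_graph(used_points):
--     cones = []
--     for points in used_points:
--         cones_height = []
--         sum_neg = 0
--         sum_pos = 0
--         for point in points:
--             cones_height.append(point[1])
--             if point[1] >= 0:
--                 sum_pos += point[1]
--             else:
--                 sum_neg += point[1]
--         cones.append((points[0][0], cones_height, sum_pos, sum_neg))
--     return cones
-- ===== SOURCE B (Python) =====
-- def define_graph(used_points):
--     # Recursive decomposition: summarize the head group, recurse on the tail.
--     # sum_pos is derived arithmetically as total - sum_neg (no >=0 pass).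
--     if not used_points:
--         return []
--     points = used_points[0]
--     heights = [p[1] for p in points]
--     total = sum(heights)
--     neg = sum(h for h in heights if h < 0)
--     return [(points[0][0], heights, total - neg, neg)] + define_graph(used_points[1:])
-- ===== Notes on version B (the rewrite author's own statement) =====
-- stated objective: alternative
-- what changed: A's fused accumulator loop with three running values is replaced by structural recursion over the groups in which the positive sum is never accumulated at all: B computes the total and the negative sum and derives sum_pos = total - sum_neg by the partition identity.
-- outside the precondition, e.g. on define_graph([[]]): A raises IndexError, B raises IndexError
import Mathlib
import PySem

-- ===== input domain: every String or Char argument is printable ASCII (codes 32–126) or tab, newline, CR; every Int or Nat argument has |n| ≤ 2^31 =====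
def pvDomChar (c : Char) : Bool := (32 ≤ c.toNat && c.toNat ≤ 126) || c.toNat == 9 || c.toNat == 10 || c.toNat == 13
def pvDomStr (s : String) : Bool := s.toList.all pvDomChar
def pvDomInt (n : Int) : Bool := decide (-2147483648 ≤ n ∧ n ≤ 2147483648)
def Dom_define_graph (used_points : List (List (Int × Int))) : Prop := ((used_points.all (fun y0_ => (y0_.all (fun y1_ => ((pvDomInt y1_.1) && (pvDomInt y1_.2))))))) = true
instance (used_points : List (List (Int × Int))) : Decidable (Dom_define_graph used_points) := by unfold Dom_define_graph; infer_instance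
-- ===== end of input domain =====

-- B replaces A's fused three-accumulator loop by structural recursion over the groups,
-- and never accumulates the positive sum: it derives sum_pos = total - sum_neg.

-- ===== PORT A =====
-- A's inner loop state: (cones_height, sum_pos, sum_neg); points[0][0] via pyGet?
-- (Pre_ guarantees the index is in range, so the .getD default is never used).
def define_graph (used_points : List (List (Int × Int))) : List (Int × List Int × Int × Int) :=
  used_points.foldl (fun cones points =>
    let st := points.foldl
      (fun (s : List Int × Int × Int) point =>
        (s.1 ++ [point.2],
         if point.2 ≥ 0 then s.2.1 + point.2 else s.2.1,
         if point.2 ≥ 0 then s.2.2 else s.2.2 + point.2))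
      ([], 0, 0)
    cones ++ [(((PySem.List.pyGet? points 0).getD (0, 0)).1, st.1, st.2.1, st.2.2)]) []

-- ===== PORT B =====
def define_graph_alt (used_points : List (List (Int × Int))) : List (Int × List Int × Int × Int) :=
  match used_points with
  | [] => []
  | points :: rest =>
    let heights := points.map (fun p => p.2)
    let total := heights.sum
    let neg := (heights.filter (fun h => h < 0)).sum
    (((PySem.List.pyGet? points 0).getD (0, 0)).1, heights, total - neg, neg)
      :: define_graph_alt rest

-- ===== PRECONDITION & SPEC =====
-- Pre_ excludes inputs containing an empty point group, on which A raises IndexError at points[0][0].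
def Pre_define_graph (used_points : List (List (Int × Int))) : Prop :=
  ∀ points ∈ used_points, points ≠ []
instance (used_points : List (List (Int × Int))) : Decidable (Pre_define_graph used_points) := by
  unfold Pre_define_graph; infer_instance
def pvWitness_define_graph : (List (List (Int × Int))) := [[(1, 2), (3, -4)], [(5, 0)]]

def Spec_define_graph (used_points : List (List (Int × Int))) (out : List (Int × List Int × Int × Int)) : Prop := out = define_graph_alt used_points
instance (used_points : List (List (Int × Int))) (out : List (Int × List Int × Int × Int)) : Decidable (Spec_define_graph used_points out) := by unfold Spec_define_graph; infer_instance

-- ===== CLAIM =====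
def Claim_equal_define_graph : Prop := ∀ (used_points : List (List (Int × Int))), Dom_define_graph used_points → Pre_define_graph used_points → Spec_define_graph used_points (define_graph used_points)

-- ===== LEMMAS AND PROOFS =====
lemma inner_fold (points : List (Int × Int)) (h : List Int) (p n : Int) :
    points.foldl
      (fun (s : List Int × Int × Int) point =>
        (s.1 ++ [point.2],
         if point.2 ≥ 0 then s.2.1 + point.2 else s.2.1,
         if point.2 ≥ 0 then s.2.2 else s.2.2 + point.2))
      (h, p, n)
    = (h ++ points.map (fun p => p.2),
       p + ((points.map (fun p => p.2)).filter (fun x => x ≥ 0)).sum,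
       n + ((points.map (fun p => p.2)).filter (fun x => x < 0)).sum) := by
  induction points generalizing h p n with
  | nil => simp
  | cons a t ih =>
    simp only [List.foldl_cons, List.map_cons, List.filter_cons, ih]
    by_cases ha : a.2 ≥ 0
    · have : ¬ (a.2 < 0) := by omega
      simp [ha, this]; omega
    · have : a.2 < 0 := by omega
      simp [ha, this]; omega

-- the partition identity B relies on: pos-filter sum = total - neg-filter sum
lemma filter_sum_split (l : List Int) :
    (l.filter (fun x => x ≥ 0)).sum = l.sum - (l.filter (fun x => x < 0)).sum := by
  induction l with
  | nil => simp
  | cons a t ih =>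
    by_cases ha : a ≥ 0
    · have : ¬ (a < 0) := by omega
      simp [ha, this, ih]; ring
    · have : a < 0 := by omega
      simp [ha, this, ih]

lemma outer_fold (used_points : List (List (Int × Int))) (acc : List (Int × List Int × Int × Int)) :
    used_points.foldl (fun cones points =>
      let st := points.foldl
        (fun (s : List Int × Int × Int) point =>
          (s.1 ++ [point.2],
           if point.2 ≥ 0 then s.2.1 + point.2 else s.2.1,
           if point.2 ≥ 0 then s.2.2 else s.2.2 + point.2))
        ([], 0, 0)
      cones ++ [(((PySem.List.pyGet? points 0).getD (0, 0)).1, st.1, st.2.1, st.2.2)]) acc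
    = acc ++ define_graph_alt used_points := by
  induction used_points generalizing acc with
  | nil => simp [define_graph_alt]
  | cons pts t ih =>
    rw [List.foldl_cons]
    simp only [ih, define_graph_alt]
    simp [inner_fold, filter_sum_split]

-- ===== VERDICT =====
theorem define_graph_spec : Claim_equal_define_graph := by
  intro up _ _
  unfold Spec_define_graph define_graph
  simpa using outer_fold up []
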